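-- pv_equiv track=rewrite | github.com/miliar/Code_Jam_Webscraper | solutions_python/Problem_179/2625.py | helper
-- ===== SOURCE A (Python) =====
-- def helper(n,i, end):
--     if i == end:
--         yield n
--     else:
--         ln = list(n)
--         ln[i] = "0"
--         for r in helper("".join(ln), i+1, end):
--             yield "".join(r)
--         ln[i] = "1"
--         for r in helper("".join(ln), i+1, end):
--             yield "".join(r)
-- ===== SOURCE B (Python) =====
-- def helper(n, i, end):
--     # Flat enumeration: read each combination off the bits of a counter,
--     # MSB at position i, instead of recursive branching.
--     k = end - i
--     for v in range(1 << k):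
--         ln = list(n)
--         for j in range(k):
--             ln[i + j] = "1" if (v >> (k - 1 - j)) & 1 else "0"
--         yield "".join(ln)
-- ===== Notes on version B (the rewrite author's own statement) =====
-- stated objective: alternative
-- what changed: Replaces A's recursive two-way branching (with a join at every level) by a single flat loop over an integer counter 0..2^(end-i)-1, reading each output string directly off the counter's bits (MSB at position i).
import Mathlib
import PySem

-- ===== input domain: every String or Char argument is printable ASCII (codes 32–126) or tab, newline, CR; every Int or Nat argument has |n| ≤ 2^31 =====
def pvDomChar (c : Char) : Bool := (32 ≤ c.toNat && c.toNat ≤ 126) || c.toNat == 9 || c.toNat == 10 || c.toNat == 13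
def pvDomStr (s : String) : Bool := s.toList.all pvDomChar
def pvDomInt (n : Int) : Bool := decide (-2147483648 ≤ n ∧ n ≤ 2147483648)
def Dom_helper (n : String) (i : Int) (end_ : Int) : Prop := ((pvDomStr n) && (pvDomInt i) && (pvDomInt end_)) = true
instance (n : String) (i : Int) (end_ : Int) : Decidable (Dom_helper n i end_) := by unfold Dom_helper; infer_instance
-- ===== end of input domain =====

-- B replaces A's recursive two-way branching by one flat loop over a counter,
-- reading each combination off the counter's bits (MSB at position i): 'alternative'.

-- ===== PORT A =====
-- Literal port of A's generator (materialised as the list of yielded strings).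
-- '"".join(ln)' on a list of chars is String.mk; '"".join(r)' on a string r is r itself.
def helper (n : String) (i : Int) (end_ : Int) : List String :=
  if i = end_ then [n]
  else if _h : i < end_ then
    let ln0 := PySem.List.pySetD n.toList i '0'
    let r0 := helper (String.mk ln0) (i + 1) end_
    let ln1 := PySem.List.pySetD ln0 i '1'         -- ln[i] = "1" mutates the same list
    let r1 := helper (String.mk ln1) (i + 1) end_
    r0 ++ r1
  else []   -- i > end_: Python A never returns (unbounded recursion); outside Pre_
termination_by (end_ - i).toNat
decreasing_by all_goals omega

-- ===== PORT B =====
-- '"1" if (v >> (k-1-j)) & 1 else "0"'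
def bitChar (v s : Nat) : Char := if (v >>> s) &&& 1 ≠ 0 then '1' else '0'

def helper_alt (n : String) (i : Int) (end_ : Int) : List String :=
  let k := (end_ - i).toNat
  (List.range (2 ^ k)).map (fun v =>
    String.mk ((List.range k).foldl
      (fun ln (j : Nat) => PySem.List.pySetD ln (i + (j : Int)) (bitChar v (k - 1 - j))) n.toList))

-- ===== PRECONDITION & SPEC =====
-- Exactly where Python A returns: i = end (yields n unexamined), or i < end with every
-- touched index i..end-1 a valid (possibly negative, Python-wraparound) index into n.
-- i > end (unbounded recursion) and out-of-range indices (IndexError) are excluded.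
def Pre_helper (n : String) (i : Int) (end_ : Int) : Prop :=
  i = end_ ∨ (i < end_ ∧ -(n.length : Int) ≤ i ∧ end_ ≤ (n.length : Int))
instance (n : String) (i : Int) (end_ : Int) : Decidable (Pre_helper n i end_) := by
  unfold Pre_helper; infer_instance

def pvWitness_helper : String × Int × Int := ("ab", 0, 2)

def Spec_helper (n : String) (i : Int) (end_ : Int) (out : List String) : Prop := out = helper_alt n i end_
instance (n : String) (i : Int) (end_ : Int) (out : List String) : Decidable (Spec_helper n i end_ out) := by unfold Spec_helper; infer_instance

-- ===== CLAIM (what is proved, stated in full; the proofs are below) =====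
def Claim_equal_helper : Prop := ∀ (n : String) (i : Int) (end_ : Int), Dom_helper n i end_ → Pre_helper n i end_ → Spec_helper n i end_ (helper n i end_)

-- ===== LEMMAS AND PROOFS =====

-- the inner loop of B, as a named function for the proofs
def fillBits (l : List Char) (i : Int) (k : Nat) (v : Nat) : List Char :=
  (List.range k).foldl (fun ln (j : Nat) => PySem.List.pySetD ln (i + (j : Int)) (bitChar v (k - 1 - j))) l

lemma toList_mk (l : List Char) : (String.mk l).toList = l :=
  Eq.symm (String.ofList_eq.mp rfl)

lemma mk_toList (s : String) : String.mk s.toList = s :=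
  String.ofList_eq.mpr rfl

lemma pySetD_pySetD (l : List Char) (i : Int) (a b : Char) :
    PySem.List.pySetD (PySem.List.pySetD l i a) i b = PySem.List.pySetD l i b := by
  simp only [PySem.List.pySetD, PySem.List.pySet?]
  rcases h : PySem.List.pyIdx? l.length i with _ | k
  · simp [h]
  · simp only [h, Option.map_some, Option.getD_some, List.length_set, List.set_set]

lemma bitChar_high_zero {v k : Nat} (h : v < 2 ^ k) : bitChar v k = '0' := by
  simp [bitChar, Nat.shiftRight_eq_div_pow, Nat.div_eq_of_lt h]

lemma bitChar_high_one {v k : Nat} (h : v < 2 ^ k) : bitChar (2 ^ k + v) k = '1' := by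
  have h1 : (2 ^ k + v) / 2 ^ k = 1 := by
    rw [Nat.add_comm, Nat.add_div_right _ (Nat.two_pow_pos k),
      Nat.div_eq_of_lt h]
  simp [bitChar, Nat.shiftRight_eq_div_pow, h1]

lemma bitChar_low {v k s : Nat} (h : s < k) : bitChar (2 ^ k + v) s = bitChar v s := by
  have hsplit : 2 ^ k = 2 ^ s * 2 ^ (k - s) := by
    rw [← pow_add]; congr 1; omega
  have hdiv : (2 ^ k + v) / 2 ^ s = 2 ^ (k - s) + v / 2 ^ s := by
    rw [hsplit, Nat.mul_add_div (Nat.two_pow_pos s)]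
  have heven : 2 ^ (k - s) = 2 * 2 ^ (k - s - 1) := by
    rw [← pow_succ']; congr 1; omega
  have hmod : (2 ^ k + v) / 2 ^ s % 2 = v / 2 ^ s % 2 := by
    rw [hdiv, heven]; omega
  simp [bitChar, Nat.shiftRight_eq_div_pow, Nat.and_one_is_mod, hmod]

lemma fillBits_succ (l : List Char) (i : Int) (k v : Nat) :
    fillBits l i (k + 1) v =
      (List.range k).foldl
        (fun ln (j : Nat) => PySem.List.pySetD ln ((i + 1) + (j : Int)) (bitChar v (k - 1 - j)))
        (PySem.List.pySetD l i (bitChar v k)) := by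
  unfold fillBits
  rw [List.range_succ_eq_map]
  simp only [List.foldl_cons, List.foldl_map]
  have h0 : i + ((0 : Nat) : Int) = i := by push_cast; ring
  have hb : k + 1 - 1 - 0 = k := by omega
  rw [h0, hb]
  apply PySem.List.foldl_congr_mem
  intro acc j _
  congr 1
  · push_cast; ring
  · congr 1; omega

lemma fillBits_succ_lo (l : List Char) (i : Int) (k v : Nat) (hv : v < 2 ^ k) :
    fillBits l i (k + 1) v = fillBits (PySem.List.pySetD l i '0') (i + 1) k v := by
  rw [fillBits_succ, bitChar_high_zero hv]; rfl

lemma fillBits_succ_hi (l : List Char) (i : Int) (k v : Nat) (hv : v < 2 ^ k) :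
    fillBits l i (k + 1) (2 ^ k + v) = fillBits (PySem.List.pySetD l i '1') (i + 1) k v := by
  rw [fillBits_succ, bitChar_high_one hv]
  unfold fillBits
  apply PySem.List.foldl_congr_mem
  intro acc j hj
  rw [List.mem_range] at hj
  rw [bitChar_low (by omega)]

lemma helper_eq_fill (k : Nat) : ∀ (i : Int) (l : List Char),
    helper (String.mk l) i (i + (k : Int)) =
      (List.range (2 ^ k)).map (fun v => String.mk (fillBits l i k v)) := by
  induction k with
  | zero =>
    intro i l
    rw [helper]
    simp [fillBits]
  | succ k ih =>
    intro i l
    rw [helper]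
    have hne : ¬ (i = i + ((k + 1 : Nat) : Int)) := by push_cast; omega
    have hlt : i < i + ((k + 1 : Nat) : Int) := by push_cast; omega
    simp only [hne, if_false, hlt, dif_pos, pySetD_pySetD, toList_mk]
    have harg : i + ((k + 1 : Nat) : Int) = (i + 1) + (k : Int) := by push_cast; ring
    rw [harg, ih (i + 1), ih (i + 1)]
    have hsplit : 2 ^ (k + 1) = 2 ^ k + 2 ^ k := by rw [pow_succ]; omega
    rw [hsplit, List.range_add, List.map_append, List.map_map]
    congr 1
    · apply List.map_congr_left
      intro v hv
      rw [List.mem_range] at hv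
      rw [fillBits_succ_lo l i k v hv]
    · apply List.map_congr_left
      intro v hv
      rw [List.mem_range] at hv
      simp only [Function.comp]
      rw [fillBits_succ_hi l i k v hv]

theorem helper_spec : Claim_equal_helper := by
  unfold Claim_equal_helper
  intro n i end_ _ hpre
  unfold Spec_helper helper_alt
  have hle : i ≤ end_ := by
    rcases hpre with h | h
    · omega
    · omega
  have hk : end_ = i + ((end_ - i).toNat : Int) := by omega
  calc helper n i end_
      = helper (String.mk n.toList) i (i + ((end_ - i).toNat : Int)) := by
        rw [← hk]; congr 1; exact (mk_toList n).symm
    _ = (List.range (2 ^ (end_ - i).toNat)).map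
          (fun v => String.mk (fillBits n.toList i (end_ - i).toNat v)) :=
        helper_eq_fill (end_ - i).toNat i n.toList
    _ = _ := rfl
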